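-- pv_equiv track=rewrite | github.com/kato0116/atcoder | 2023/tournament/0514/panasonic_0514.py | reversal
-- ===== SOURCE A (Python) =====
-- def reversal(A,L,R):
--     tmp = []
--     for i in range(L):
--         tmp.append(A[i])
--
--     for j in range(R-L+1):
--         tmp.append(A[R-j])
--
--     for k in range(R+1,len(A)):
--         tmp.append(A[k])
--
--     return tmp
-- ===== SOURCE B (Python) =====
-- def reversal(A, L, R):
--     # one pass over output positions with an arithmetic source-index map,
--     # instead of three separate append loops
--     lp = max(L, 0)
--     m = max(R - L + 1, 0)
--     t = max(len(A) - R - 1, 0)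
--     out = []
--     for p in range(lp + m + t):
--         if p < lp:
--             s = p
--         elif p < lp + m:
--             s = R - (p - lp)
--         else:
--             s = p - lp - m + R + 1
--         out.append(A[s])
--     return out
-- ===== Notes on version B (the rewrite author's own statement) =====
-- stated objective: alternative
-- what changed: replaces A's three sequential append loops (prefix, backward segment, suffix) by a single pass over output positions whose source index is computed by a piecewise arithmetic map
import Mathlib
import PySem

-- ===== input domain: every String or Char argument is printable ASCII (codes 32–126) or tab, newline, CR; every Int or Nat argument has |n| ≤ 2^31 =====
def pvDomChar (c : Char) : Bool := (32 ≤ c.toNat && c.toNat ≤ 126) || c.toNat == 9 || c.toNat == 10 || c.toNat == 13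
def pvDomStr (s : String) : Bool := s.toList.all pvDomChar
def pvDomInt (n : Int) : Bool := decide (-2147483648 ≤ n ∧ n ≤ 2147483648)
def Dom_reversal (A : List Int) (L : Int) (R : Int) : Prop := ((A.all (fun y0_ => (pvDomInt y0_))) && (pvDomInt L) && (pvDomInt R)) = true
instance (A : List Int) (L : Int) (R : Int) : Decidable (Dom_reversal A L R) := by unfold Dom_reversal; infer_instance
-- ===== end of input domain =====

-- B replaces A's three sequential append loops by a single pass over output positions
-- with a piecewise arithmetic source-index map (objective: alternative; same cost).


-- ===== PORT A =====
-- three loops: prefix indices, the segment read backwards, the suffix indices;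
-- A[x] is Python indexing (negative x reads from the end) = PySem.List.pyGetD,
-- total here because Pre_ excludes exactly the IndexError inputs
def reversal (A : List Int) (L : Int) (R : Int) : List Int :=
  let tmp1 := (PySem.List.pyRange 0 L 1).foldl (fun tmp i => tmp ++ [PySem.List.pyGetD A i 0]) []
  let tmp2 := (PySem.List.pyRange 0 (R - L + 1) 1).foldl (fun tmp j => tmp ++ [PySem.List.pyGetD A (R - j) 0]) tmp1
  (PySem.List.pyRange (R + 1) (PySem.List.len A) 1).foldl (fun tmp k => tmp ++ [PySem.List.pyGetD A k 0]) tmp2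

-- ===== PORT B =====
-- one loop over output positions p; the source index is computed arithmetically
def reversal_alt (A : List Int) (L : Int) (R : Int) : List Int :=
  let lp := max L 0
  let m := max (R - L + 1) 0
  let t := max (PySem.List.len A - R - 1) 0
  (PySem.List.pyRange 0 (lp + m + t) 1).foldl
    (fun out p =>
      out ++ [PySem.List.pyGetD A
        (if p < lp then p
         else if p < lp + m then R - (p - lp)
         else p - lp - m + R + 1) 0]) []

-- ===== PRECONDITION & SPEC =====
-- Pre_ is exactly the set of inputs on which Python A returns (no IndexError):
-- the prefix loop needs L ≤ len(A); the backward segment loop (nonempty iff L ≤ R)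
-- needs -len(A) ≤ L and R < len(A); the suffix loop (nonempty iff R+1 < len(A))
-- needs -len(A) ≤ R+1.
def Pre_reversal (A : List Int) (L : Int) (R : Int) : Prop :=
  L ≤ (A.length : Int) ∧
  (R < L ∨ (-(A.length : Int) ≤ L ∧ R < (A.length : Int))) ∧
  ((A.length : Int) ≤ R + 1 ∨ -(A.length : Int) ≤ R + 1)
instance (A : List Int) (L : Int) (R : Int) : Decidable (Pre_reversal A L R) := by
  unfold Pre_reversal; infer_instance

def pvWitness_reversal : List Int × Int × Int := ([1, 2, 3, 4], 1, 2)

def Spec_reversal (A : List Int) (L : Int) (R : Int) (out : List Int) : Prop := out = reversal_alt A L R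
instance (A : List Int) (L : Int) (R : Int) (out : List Int) : Decidable (Spec_reversal A L R out) := by unfold Spec_reversal; infer_instance

-- ===== CLAIM (what is proved, stated in full; the proofs are below) =====
def Claim_equal_reversal : Prop := ∀ (A : List Int) (L : Int) (R : Int), Dom_reversal A L R → Pre_reversal A L R → Spec_reversal A L R (reversal A L R)

-- ===== LEMMAS AND PROOFS =====

-- the two programs read A at the SAME index sequence, in the same order:
-- A's three ranges concatenated equal B's single range mapped through the
-- piecewise index function (unconditionally, for every L R n)
lemma index_lists_eq (L R n : Int) :
    PySem.List.pyRange 0 L 1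
      ++ (PySem.List.pyRange 0 (R - L + 1) 1).map (fun j => R - j)
      ++ PySem.List.pyRange (R + 1) n 1
    = (PySem.List.pyRange 0 (max L 0 + max (R - L + 1) 0 + max (n - R - 1) 0) 1).map
        (fun p =>
          if p < max L 0 then p
          else if p < max L 0 + max (R - L + 1) 0 then R - (p - max L 0)
          else p - max L 0 - max (R - L + 1) 0 + R + 1) := by
  set lp := max L 0 with hlp
  set m := max (R - L + 1) 0 with hm
  set t := max (n - R - 1) 0 with ht
  rw [PySem.List.pyRange_one_append 0 lp (lp + m + t) (by omega) (by omega),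
      PySem.List.pyRange_one_append lp (lp + m) (lp + m + t) (by omega) (by omega),
      List.map_append, List.map_append]
  have h1 : (PySem.List.pyRange 0 lp 1).map
      (fun p => if p < lp then p else if p < lp + m then R - (p - lp) else p - lp - m + R + 1)
      = PySem.List.pyRange 0 L 1 := by
    by_cases h : L ≤ 0
    · rw [PySem.List.pyRange_one_eq_nil (by omega), PySem.List.pyRange_one_eq_nil (by omega)]
      simp
    · have hLp : lp = L := by omega
      rw [hLp]
      rw [PySem.List.pyRange_one, List.map_map]
      refine List.map_congr_left (fun k hk => ?_)
      simp only [List.mem_range] at hk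
      have : (0 : Int) + k < L := by omega
      simp only [Function.comp_apply]
      rw [if_pos this]
  have h2 : (PySem.List.pyRange lp (lp + m) 1).map
      (fun p => if p < lp then p else if p < lp + m then R - (p - lp) else p - lp - m + R + 1)
      = (PySem.List.pyRange 0 (R - L + 1) 1).map (fun j => R - j) := by
    rw [PySem.List.pyRange_one lp (lp + m), PySem.List.pyRange_one 0 (R - L + 1),
        List.map_map, List.map_map]
    have hmm : (lp + m - lp).toNat = (R - L + 1 - 0).toNat := by omega
    rw [hmm]
    refine List.map_congr_left (fun k hk => ?_)
    simp only [List.mem_range] at hk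
    have hkm : (k : Int) < m := by omega
    simp only [Function.comp_apply]
    rw [if_neg (by omega), if_pos (by omega)]
    omega
  have h3 : (PySem.List.pyRange (lp + m) (lp + m + t) 1).map
      (fun p => if p < lp then p else if p < lp + m then R - (p - lp) else p - lp - m + R + 1)
      = PySem.List.pyRange (R + 1) n 1 := by
    rw [PySem.List.pyRange_one (lp + m) (lp + m + t), PySem.List.pyRange_one (R + 1) n,
        List.map_map]
    have hmm : (lp + m + t - (lp + m)).toNat = (n - (R + 1)).toNat := by omega
    rw [hmm]
    refine List.map_congr_left (fun k hk => ?_)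
    simp only [List.mem_range] at hk
    simp only [Function.comp_apply]
    rw [if_neg (by omega), if_neg (by omega)]
    omega
  rw [h1, h2, h3, List.append_assoc]

-- ===== VERDICT (by name: the statement is the Claim_ definition above) =====
theorem reversal_spec : Claim_equal_reversal := by
  intro A L R _ _
  unfold Spec_reversal reversal reversal_alt
  simp only [PySem.List.foldl_append_singleton_eq_map, List.nil_append, List.append_assoc,
    PySem.List.len_eq]
  have key := congrArg (List.map (fun i => PySem.List.pyGetD A i 0))
    (index_lists_eq L R ((A.length : Int)))
  simp only [List.map_append, List.map_map, List.append_assoc] at key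
  exact key
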